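-- pv_equiv track=rewrite | github.com/Hansimov/bili-search | debugs/scan_sensitive_info.py | find_forbidden_tracked_paths
-- ===== SOURCE A (Python) =====
-- ALLOWED_TRACKED_CONFIG_FILES = {
--     "configs/__init__.py",
--     "configs/envs.json",
--     "configs/envs.py",
--     "configs/secrets.json.example",
-- }
--
-- def find_forbidden_tracked_paths(tracked_relpaths: set[str]) -> list[str]:
--     violations: list[str] = []
--     for relpath in sorted(tracked_relpaths):
--         if not relpath.startswith("configs/"):
--             continue
--         if relpath in ALLOWED_TRACKED_CONFIG_FILES:
--             continue
--         violations.append(f"{relpath} must remain untracked")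
--     return violations
-- ===== SOURCE B (Python) =====
-- ALLOWED_TRACKED_CONFIG_FILES = {
--     "configs/__init__.py",
--     "configs/envs.json",
--     "configs/envs.py",
--     "configs/secrets.json.example",
-- }
--
-- def _insert_sorted(xs, x):
--     i = 0
--     while i < len(xs) and xs[i] < x:
--         i += 1
--     xs.insert(i, x)
--
-- def find_forbidden_tracked_paths(tracked_relpaths: set[str]) -> list[str]:
--     forbidden: list[str] = []
--     for relpath in tracked_relpaths:
--         if relpath.startswith("configs/") and relpath not in ALLOWED_TRACKED_CONFIG_FILES:
--             _insert_sorted(forbidden, relpath)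
--     return [p + " must remain untracked" for p in forbidden]
-- ===== Notes on version B (the rewrite author's own statement) =====
-- stated objective: alternative
-- what changed: B never calls sort: it makes one pass over the unsorted input and maintains the forbidden paths itself as a sorted list via hand-rolled ordered insertion, then formats; A sorts the whole input with the library sort and filters with two continue branches.
import Mathlib
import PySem

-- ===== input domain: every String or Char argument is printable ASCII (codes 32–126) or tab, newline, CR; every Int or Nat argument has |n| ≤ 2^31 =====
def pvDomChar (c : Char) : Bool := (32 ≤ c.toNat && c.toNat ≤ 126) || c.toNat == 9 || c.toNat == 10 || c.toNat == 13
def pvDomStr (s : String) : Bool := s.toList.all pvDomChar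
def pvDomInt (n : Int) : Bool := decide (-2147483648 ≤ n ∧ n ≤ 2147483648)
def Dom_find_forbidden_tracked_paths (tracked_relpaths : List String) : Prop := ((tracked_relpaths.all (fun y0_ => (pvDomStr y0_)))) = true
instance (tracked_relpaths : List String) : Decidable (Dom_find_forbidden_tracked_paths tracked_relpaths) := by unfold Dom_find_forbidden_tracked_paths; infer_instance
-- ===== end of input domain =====

-- B replaces A's sort-then-filter scan by a single pass over the unsorted input that keeps the
-- forbidden paths in a hand-maintained sorted accumulator (ordered insertion), then formats (objective: alternative).

-- ALLOWED_TRACKED_CONFIG_FILES (module constant shared by both versions)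
def ALLOWED_TRACKED_CONFIG_FILES : List String :=
  ["configs/__init__.py", "configs/envs.json", "configs/envs.py", "configs/secrets.json.example"]

-- ===== PORT A =====
def find_forbidden_tracked_paths (tracked_relpaths : List String) : List String :=
  (PySem.List.sorted tracked_relpaths (fun x => x) false).foldl
    (fun violations relpath =>
      if ¬ (PySem.Str.startswith relpath "configs/") then violations
      else if ALLOWED_TRACKED_CONFIG_FILES.contains relpath then violations
      else violations ++ [relpath ++ " must remain untracked"]) []

-- ===== PORT B =====
-- Source B's _insert_sorted: scan past the elements < x, insert x there (linear scan as recursion)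
def pvInsertSorted : List String → String → List String
  | [], x => [x]
  | y :: ys, x => if y < x then y :: pvInsertSorted ys x else x :: y :: ys

def find_forbidden_tracked_paths_alt (tracked_relpaths : List String) : List String :=
  (tracked_relpaths.foldl
    (fun forbidden relpath =>
      if PySem.Str.startswith relpath "configs/" && !(ALLOWED_TRACKED_CONFIG_FILES.contains relpath)
      then pvInsertSorted forbidden relpath else forbidden) []).map
    (fun p => p ++ " must remain untracked")

-- ===== PRECONDITION & SPEC =====
-- The Python parameter is a set[str]: its list representation holds distinct elements.
def Pre_find_forbidden_tracked_paths (tracked_relpaths : List String) : Prop :=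
  tracked_relpaths.Nodup
instance (tracked_relpaths : List String) : Decidable (Pre_find_forbidden_tracked_paths tracked_relpaths) := by
  unfold Pre_find_forbidden_tracked_paths; infer_instance

def pvWitness_find_forbidden_tracked_paths : List String :=
  ["configs/secrets.json", "README.md", "configs/envs.py"]

def Spec_find_forbidden_tracked_paths (tracked_relpaths : List String) (out : List String) : Prop := out = find_forbidden_tracked_paths_alt tracked_relpaths
instance (tracked_relpaths : List String) (out : List String) : Decidable (Spec_find_forbidden_tracked_paths tracked_relpaths out) := by unfold Spec_find_forbidden_tracked_paths; infer_instance

-- ===== CLAIM (what is proved, stated in full; the proofs are below) =====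
def Claim_equal_find_forbidden_tracked_paths : Prop := ∀ (tracked_relpaths : List String), Dom_find_forbidden_tracked_paths tracked_relpaths → Pre_find_forbidden_tracked_paths tracked_relpaths → Spec_find_forbidden_tracked_paths tracked_relpaths (find_forbidden_tracked_paths tracked_relpaths)

-- ===== LEMMAS AND PROOFS =====

-- the combined test of A's two continue branches / B's single if
def pvForbidden (p : String) : Bool :=
  PySem.Str.startswith p "configs/" && !(ALLOWED_TRACKED_CONFIG_FILES.contains p)

lemma A_eq_filter_map (xs : List String) :
    find_forbidden_tracked_paths xs =
      ((PySem.List.sorted xs (fun x => x) false).filter pvForbidden).map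
        (fun p => p ++ " must remain untracked") := by
  unfold find_forbidden_tracked_paths
  have h : (fun (violations : List String) (relpath : String) =>
      if ¬ (PySem.Str.startswith relpath "configs/") then violations
      else if ALLOWED_TRACKED_CONFIG_FILES.contains relpath then violations
      else violations ++ [relpath ++ " must remain untracked"]) =
      (fun acc x => if pvForbidden x then acc ++ [x ++ " must remain untracked"] else acc) := by
    funext acc x
    simp only [pvForbidden, List.contains_eq_mem, Bool.and_eq_true, Bool.not_eq_true,
      decide_eq_true_eq, PySem.Str.startswith_eq]
    by_cases hs : PySem.Chars.startswith x.toList ['c', 'o', 'n', 'f', 'i', 'g', 's', '/'] = true <;>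
      by_cases hm : x ∈ ALLOWED_TRACKED_CONFIG_FILES <;>
        simp [hs, hm]
  rw [h, PySem.List.foldl_append_if]
  simp

lemma foldl_if_filter (xs acc : List String) :
    xs.foldl (fun acc p => if pvForbidden p then pvInsertSorted acc p else acc) acc =
      (xs.filter pvForbidden).foldl pvInsertSorted acc := by
  induction xs generalizing acc with
  | nil => rfl
  | cons y ys ih =>
      by_cases h : pvForbidden y <;> simp [h, ih]

lemma insert_perm (l : List String) (x : String) : (pvInsertSorted l x).Perm (x :: l) := by
  induction l with
  | nil => rfl
  | cons y ys ih =>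
      unfold pvInsertSorted
      split
      · exact (ih.cons y).trans (List.Perm.swap x y ys)
      · rfl

lemma insert_pairwise (l : List String) (x : String) (hp : l.Pairwise (· < ·)) (hx : x ∉ l) :
    (pvInsertSorted l x).Pairwise (· < ·) := by
  induction l with
  | nil => simp [pvInsertSorted]
  | cons y ys ih =>
      unfold pvInsertSorted
      rw [List.pairwise_cons] at hp
      split
      · rename_i hlt
        rw [List.pairwise_cons]
        refine ⟨?_, ih hp.2 (fun h => hx (List.mem_cons_of_mem _ h))⟩
        intro z hz
        rcases List.mem_cons.mp (((insert_perm ys x).mem_iff).mp hz) with h | h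
        · exact h ▸ hlt
        · exact hp.1 z h
      · rename_i hnlt
        have hxy : x < y := lt_of_le_of_ne (le_of_not_gt hnlt)
          (fun h => hx (h ▸ List.mem_cons_self))
        rw [List.pairwise_cons]
        refine ⟨?_, List.pairwise_cons.mpr hp⟩
        intro z hz
        rcases List.mem_cons.mp hz with h | h
        · exact h ▸ hxy
        · exact hxy.trans (hp.1 z h)

lemma fold_insert (ys acc : List String) (h1 : acc.Pairwise (· < ·))
    (h2 : (acc ++ ys).Nodup) :
    (ys.foldl pvInsertSorted acc).Pairwise (· < ·) ∧
      (ys.foldl pvInsertSorted acc).Perm (acc ++ ys) := by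
  induction ys generalizing acc with
  | nil => exact ⟨h1, by simp⟩
  | cons y ys ih =>
      have hxnot : y ∉ acc := by
        intro h
        have := List.disjoint_of_nodup_append h2 h
        simp at this
      have hperm1 : (pvInsertSorted acc y).Perm (y :: acc) := insert_perm acc y
      have hpw : (pvInsertSorted acc y).Pairwise (· < ·) := insert_pairwise acc y h1 hxnot
      have hnd : ((pvInsertSorted acc y) ++ ys).Nodup := by
        have hp : ((pvInsertSorted acc y) ++ ys).Perm (acc ++ y :: ys) :=
          (hperm1.append_right ys).trans (List.perm_middle.symm)
        exact hp.nodup_iff.mpr h2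
      obtain ⟨hA, hB⟩ := ih (pvInsertSorted acc y) hpw hnd
      refine ⟨hA, hB.trans ?_⟩
      exact ((hperm1.append_right ys).trans List.perm_middle.symm)

lemma main_eq (xs : List String) (hnd : xs.Nodup) :
    find_forbidden_tracked_paths xs = find_forbidden_tracked_paths_alt xs := by
  rw [A_eq_filter_map]
  unfold find_forbidden_tracked_paths_alt
  rw [show (fun (forbidden : List String) relpath =>
      if PySem.Str.startswith relpath "configs/" && !(ALLOWED_TRACKED_CONFIG_FILES.contains relpath)
      then pvInsertSorted forbidden relpath else forbidden) =
      (fun acc p => if pvForbidden p then pvInsertSorted acc p else acc) from rfl]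
  rw [foldl_if_filter]
  congr 1
  -- both sides are strictly increasing rearrangements of xs.filter pvForbidden
  set f : List String := xs.filter pvForbidden with hf
  have hndf : f.Nodup := hnd.filter _
  obtain ⟨hBpw, hBperm⟩ := fold_insert f [] (by simp) (by simpa using hndf)
  have hApw : ((PySem.List.sorted xs (fun x => x) false).filter pvForbidden).Pairwise
      (fun a b : String => a < b) := by
    have h1 : ((PySem.List.sorted xs (fun x => x) false).filter pvForbidden).Pairwise
        (fun a b : String => a ≤ b) :=
      (PySem.List.sorted_pairwise xs (fun x => x)).filter _
    have h2 : ((PySem.List.sorted xs (fun x => x) false).filter pvForbidden).Pairwise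
        (fun a b : String => a ≠ b) :=
      (((PySem.List.sorted_perm xs (fun x => x) false).nodup_iff).mpr hnd).filter _
    exact (h1.and h2).imp (fun h => lt_of_le_of_ne h.1 h.2)
  have hAperm : ((PySem.List.sorted xs (fun x => x) false).filter pvForbidden).Perm f :=
    (PySem.List.sorted_perm xs (fun x => x) false).filter _
  have eA : PySem.List.sorted f (fun x => x) false =
      (PySem.List.sorted xs (fun x => x) false).filter pvForbidden :=
    PySem.List.sorted_eq_of_perm_of_pairwise_lt f _ (fun x => x) hAperm hApw
  have eB : PySem.List.sorted f (fun x => x) false = f.foldl pvInsertSorted [] :=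
    PySem.List.sorted_eq_of_perm_of_pairwise_lt f _ (fun x => x) (by simpa using hBperm) hBpw
  rw [← eA, eB]

-- ===== VERDICT (by name: the statement is the Claim_ definition above) =====
theorem find_forbidden_tracked_paths_spec : Claim_equal_find_forbidden_tracked_paths := by
  intro xs _ hpre
  unfold Spec_find_forbidden_tracked_paths
  exact main_eq xs hpre
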